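-- pv_equiv track=rewrite | github.com/VivianaEscobarB/TLF_proyecto-master | analizadores/numero_natural.py | analizar
-- ===== SOURCE A (Python) =====
-- def analizar(texto, pos_inicial):
--     """
--     Analiza si a partir de la posición inicial hay un número natural.
--
--     Args:
--         texto: Cadena de texto a analizar
--         pos_inicial: Posición desde donde comenzar el análisis
--
--     Returns:
--         Tupla de (es_valido, lexema, caracteres_consumidos)
--     """
--     # Estados del autómata:
--     # 0: Estado inicial
--     # 1: Estado de aceptación (después de dígito distinto de 0)
--     estado = 0
--     lexema = ''  # Almacena el número que se va construyendo
--     pos = pos_inicial  # Posición actual en el texto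
--
--     while pos < len(texto):
--         c = texto[pos]  # Obtener carácter actual
--
--         if estado == 0:  # Estado inicial
--             if c.isdigit() and c != '0':
--                 # Si es un dígito distinto de 0, pasamos al estado 1
--                 estado = 1
--                 lexema += c
--                 pos += 1
--             elif c == '0':
--                 # El número 0 es un caso especial (solo el dígito)
--                 lexema = c
--                 return True, lexema, 1
--             else:
--                 break  # No es un número natural válido
--
--         elif estado == 1:  # Ya tenemos un primer dígito válido (no 0)
--             if c.isdigit():
--                 # Continuar acumulando dígitos
--                 lexema += c
--                 pos += 1
--             else:
--                 break  # Fin del número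
--
--     # Verificar si el número es válido (estado de aceptación)
--     if estado == 1:
--         return True, lexema, pos - pos_inicial
--     else:
--         return False, '', 0
-- ===== SOURCE B (Python) =====
-- def _digit_run(texto, pos):
--     # Recursively collect the maximal digit run starting at pos (front-to-back).
--     if pos < len(texto) and texto[pos].isdigit():
--         return texto[pos] + _digit_run(texto, pos + 1)
--     return ''
--
-- def analizar(texto, pos_inicial):
--     # Decide everything from the FIRST character, then (only in the general
--     # case) collect the rest of the run by recursion; no state, no position
--     # bookkeeping: the consumed count is the run's length.
--     if pos_inicial >= len(texto) or not texto[pos_inicial].isdigit():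
--         return False, '', 0
--     if texto[pos_inicial] == '0':
--         return True, '0', 1
--     digits = _digit_run(texto, pos_inicial)
--     return True, digits, len(digits)
-- ===== Notes on version B (the rewrite author's own statement) =====
-- stated objective: simpler
-- what changed: Replaced the two-state automaton loop by an up-front classification of the first character (out-of-run / '0' / general) followed by a recursive collector that builds the maximal digit run front-to-back, returning its length as the consumed count instead of tracking positions.
import Mathlib
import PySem

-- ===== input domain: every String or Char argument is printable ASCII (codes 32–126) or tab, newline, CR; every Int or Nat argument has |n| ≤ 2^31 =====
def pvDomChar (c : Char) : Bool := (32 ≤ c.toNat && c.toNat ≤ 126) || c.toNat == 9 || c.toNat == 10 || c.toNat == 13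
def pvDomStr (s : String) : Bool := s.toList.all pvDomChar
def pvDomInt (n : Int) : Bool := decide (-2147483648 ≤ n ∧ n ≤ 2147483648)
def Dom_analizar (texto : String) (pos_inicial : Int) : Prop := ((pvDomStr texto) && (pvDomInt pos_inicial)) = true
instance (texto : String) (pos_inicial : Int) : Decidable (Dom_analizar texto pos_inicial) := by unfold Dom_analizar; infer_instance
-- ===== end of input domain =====

-- B replaces A's two-state automaton by first-character classification plus a
-- recursive front-to-back digit-run collector (simpler decomposition, not faster).
-- ===== PORT A =====
-- the 'if estado == 1 … else …' epilogue after A's while loop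
def analizarFinish (estado : Int) (lexema : List Char) (pos pos_inicial : Int) : Bool × String × Int :=
  if estado == 1 then (true, String.ofList lexema, pos - pos_inicial) else (false, "", 0)

-- A's while loop; fuel = remaining length (len - pos), so fuel = 0 ↔ the loop guard pos < len fails;
-- `none` from pyGet? is Python's IndexError, excluded by Pre_analizar
def analizarLoop (t : List Char) (pos_inicial : Int) (fuel : Nat) (estado : Int)
    (lexema : List Char) (pos : Int) : Bool × String × Int :=
  match fuel with
  | 0 => analizarFinish estado lexema pos pos_inicial
  | fuel + 1 =>
    match PySem.List.pyGet? t pos with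
    | none => (false, "", 0)   -- IndexError in Python; outside Pre_analizar
    | some c =>
      if estado == 0 then
        if PySem.Chars.isdigit c && c != '0' then
          analizarLoop t pos_inicial fuel 1 (lexema ++ [c]) (pos + 1)
        else if c == '0' then (true, "0", 1)
        else analizarFinish estado lexema pos pos_inicial
      else
        if PySem.Chars.isdigit c then
          analizarLoop t pos_inicial fuel estado (lexema ++ [c]) (pos + 1)
        else analizarFinish estado lexema pos pos_inicial

def analizar (texto : String) (pos_inicial : Int) : Bool × String × Int :=
  analizarLoop texto.toList pos_inicial ((texto.toList.length : Int) - pos_inicial).toNat 0 [] pos_inicial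

-- ===== PORT B =====
-- B's recursive collector: the maximal digit run at pos, built front-to-back
-- (fuel = len - pos mirrors the 'pos < len(texto)' guard; none = IndexError, outside Pre_)
def digitRun (t : List Char) (fuel : Nat) (pos : Int) : List Char :=
  match fuel with
  | 0 => []
  | fuel + 1 =>
    match PySem.List.pyGet? t pos with
    | none => []   -- IndexError in Python; outside Pre_analizar
    | some c => if PySem.Chars.isdigit c then c :: digitRun t fuel (pos + 1) else []

def analizar_alt (texto : String) (pos_inicial : Int) : Bool × String × Int :=
  let t := texto.toList
  if pos_inicial ≥ (t.length : Int) then (false, "", 0)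
  else
    match PySem.List.pyGet? t pos_inicial with
    | none => (false, "", 0)   -- IndexError in Python; outside Pre_analizar
    | some c =>
      if ¬ PySem.Chars.isdigit c then (false, "", 0)
      else if c == '0' then (true, "0", 1)
      else
        let digits := digitRun t ((t.length : Int) - pos_inicial).toNat pos_inicial
        (true, String.ofList digits, (digits.length : Int))

-- ===== PRECONDITION & SPEC =====
-- Pre_ excludes exactly the inputs with pos_inicial < -len(texto), where A (and B) raise IndexError.
def Pre_analizar (texto : String) (pos_inicial : Int) : Prop :=
  -(texto.toList.length : Int) ≤ pos_inicial
instance (texto : String) (pos_inicial : Int) : Decidable (Pre_analizar texto pos_inicial) := by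
  unfold Pre_analizar; infer_instance
def pvWitness_analizar : String × Int := ("12a", 0)

def Spec_analizar (texto : String) (pos_inicial : Int) (out : Bool × String × Int) : Prop := out = analizar_alt texto pos_inicial
instance (texto : String) (pos_inicial : Int) (out : Bool × String × Int) : Decidable (Spec_analizar texto pos_inicial out) := by unfold Spec_analizar; infer_instance

-- ===== CLAIM (what is proved, stated in full; the proofs are below) =====
def Claim_equal_analizar : Prop := ∀ (texto : String) (pos_inicial : Int), Dom_analizar texto pos_inicial → Pre_analizar texto pos_inicial → Spec_analizar texto pos_inicial (analizar texto pos_inicial)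

-- ===== LEMMAS AND PROOFS =====

-- in range, pyGet? returns a value
lemma pyGet?_isSome_of_range (t : List Char) (pos : Int)
    (h1 : -(t.length : Int) ≤ pos) (h2 : pos < (t.length : Int)) :
    ∃ c, PySem.List.pyGet? t pos = some c := by
  cases hg : PySem.List.pyGet? t pos with
  | some c => exact ⟨c, rfl⟩
  | none =>
    rw [PySem.List.pyGet?_eq_none_iff] at hg
    exact absurd ⟨h1, h2⟩ hg

-- A's state-1 loop equals the accepting epilogue applied to B's digit run
lemma loop1_eq_run (t : List Char) (pos_inicial : Int) :
    ∀ (fuel : Nat) (lexema : List Char) (pos : Int),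
      fuel = ((t.length : Int) - pos).toNat → -(t.length : Int) ≤ pos →
      analizarLoop t pos_inicial fuel 1 lexema pos =
        (true, String.ofList (lexema ++ digitRun t fuel pos),
          pos + ((digitRun t fuel pos).length : Int) - pos_inicial) := by
  intro fuel
  induction fuel with
  | zero =>
    intro lex pos _ _
    simp [analizarLoop, digitRun, analizarFinish]
  | succ n ih =>
    intro lex pos hn hge
    have h : pos < (t.length : Int) := by omega
    obtain ⟨c, hc⟩ := pyGet?_isSome_of_range t pos hge h
    rw [analizarLoop, digitRun]
    have h10 : ¬ ((1 : Int) == 0) = true := by decide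
    simp only [hc, h10]
    by_cases hd : PySem.Chars.isdigit c
    · simp only [hd, if_pos]
      rw [ih (lex ++ [c]) (pos + 1) (by omega) (by omega)]
      simp only [List.append_assoc, List.singleton_append, List.length_cons]
      push_cast; ring_nf
    · simp [hd, analizarFinish]

-- ===== VERDICT (by name: the statement is the Claim_ definition above) =====
theorem analizar_spec : Claim_equal_analizar := by
  intro texto pos_inicial _ hpre
  unfold Spec_analizar analizar analizar_alt
  unfold Pre_analizar at hpre
  set t := texto.toList with ht
  by_cases h : pos_inicial < (t.length : Int)
  · obtain ⟨fuel, hfuel⟩ : ∃ f, ((t.length : Int) - pos_inicial).toNat = f + 1 :=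
      ⟨((t.length : Int) - pos_inicial).toNat - 1, by omega⟩
    obtain ⟨c, hc⟩ := pyGet?_isSome_of_range t pos_inicial hpre h
    have hlt : ¬ pos_inicial ≥ (t.length : Int) := by omega
    simp only [hlt, hfuel]
    rw [analizarLoop, digitRun]
    simp only [hc]
    by_cases hd : PySem.Chars.isdigit c
    · by_cases h0 : c = '0'
      · subst h0
        simp [hd]
      · have hnd : (PySem.Chars.isdigit c && c != '0') = true := by
          simp [hd]; exact h0
        have key := loop1_eq_run t pos_inicial fuel [c] (pos_inicial + 1)
          (by omega) (by omega)
        have hb0 : ¬ (c == '0') = true := by simpa using h0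
        simp [hd, hb0, h0, key, Prod.ext_iff]
        ring_nf
    · have h0 : ¬ (c == '0') = true := by
        intro hh
        exact hd (by simp at hh; subst hh; decide)
      simp [hd, h0, analizarFinish]
  · have hz : ((t.length : Int) - pos_inicial).toNat = 0 := by omega
    have hge : pos_inicial ≥ (t.length : Int) := by omega
    rw [hz]
    simp [analizarLoop, analizarFinish, hge]
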